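-- pv_equiv track=rewrite | github.com/JacobiClark/SODA-for-SPARC | src/pyFlask/validator/error_path_report_parser.py | get_target_errors
-- ===== SOURCE A (Python) =====
-- import copy
--
-- def get_target_errors(error_path_report):
--
--   user_errors = copy.deepcopy(error_path_report)
--
--   keys = error_path_report.keys()
--
--   # go through all paths and store the paths with the longest subpaths for each base
--   # also store matching subpath lengths together
--   for k in keys:
--     prefix = get_path_prefix(k)
--
--     # check for a suffix indicator in the prefix (aka a forward slash at the end of the prefix)
--     if prefix[-1] == "/":
--       # if so remove the suffix and check if the resulting prefix is an existing path key
--       # indicating it can be removed from the errors_for_users dictionary as the current path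
--       # will be an error in its subpath -- as stated in the function comment we avoid these errors
--       prefix_no_suffix_indicator = prefix[0: len(prefix) - 1]
--
--       if prefix_no_suffix_indicator in user_errors:
--         del user_errors[prefix_no_suffix_indicator]
--
--
--
--   return user_errors
--
-- def get_path_prefix(path):
--   # check if path has one "/"
--   if path.count('/') == 1:
--     # get the entire path as the "prefix" and return it
--     return path
--   else :
--     # get the path up to the final "/" and return it as the prefix
--     final_slash_idx = path.rfind("/")
--     return path[0: final_slash_idx + 1]
-- ===== SOURCE B (Python) =====
-- def get_target_errors(error_path_report):
--   # keep a path iff no path in the report names it as its parent directory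
--   return {k: v for k, v in error_path_report.items()
--           if not any(parent_dir(j) == k for j in error_path_report)}
--
-- def parent_dir(path):
--   # the parent directory a path shadows, or None for a depth-one file path
--   # like "a/b" that shadows nothing (raises ValueError on slash-free paths)
--   i = path.rindex('/')
--   if path.count('/') == 1 and i != len(path) - 1:
--     return None
--   return path[:i]
-- ===== Notes on version B (the rewrite author's own statement) =====
-- stated objective: alternative
-- what changed: A deepcopies the dict and, in one pass, builds each key's slash-terminated prefix via get_path_prefix and deletes that prefix from the copy; B drops get_path_prefix and mutation entirely and filters declaratively with a nested scan: a key is kept iff no path in the report names it as its parent directory, the parent computed directly from each path by rindex/count.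
import Mathlib
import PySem

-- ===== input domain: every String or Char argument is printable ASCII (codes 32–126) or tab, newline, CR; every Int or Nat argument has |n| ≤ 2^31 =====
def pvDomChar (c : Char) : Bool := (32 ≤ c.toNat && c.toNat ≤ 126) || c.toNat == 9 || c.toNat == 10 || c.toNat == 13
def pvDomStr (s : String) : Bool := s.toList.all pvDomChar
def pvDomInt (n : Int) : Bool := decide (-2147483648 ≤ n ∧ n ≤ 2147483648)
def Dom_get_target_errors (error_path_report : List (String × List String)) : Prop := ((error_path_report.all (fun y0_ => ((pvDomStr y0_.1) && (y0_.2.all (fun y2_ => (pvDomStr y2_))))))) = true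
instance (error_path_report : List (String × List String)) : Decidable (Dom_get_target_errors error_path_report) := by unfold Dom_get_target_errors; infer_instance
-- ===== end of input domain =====

-- B replaces A's deepcopy + single pass that computes each key's prefix and deletes that
-- prefix from the copy by a declarative nested-scan filter: a key is kept iff no path in
-- the report names it as its parent directory; the parent is computed directly from the
-- key (rindex/count), without get_path_prefix. Same return value as A on Pre_.

-- ===== PORT A =====
-- module helper used by A
def get_path_prefix (path : String) : String :=
  if PySem.Str.count path "/" = 1 then path
  else
    let final_slash_idx := PySem.Str.rfind path "/"
    PySem.Str.slice path (some 0) (some (final_slash_idx + 1))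

-- the dict argument arrives as its association list; A materialises it as a PySem.Dict
def get_target_errors (error_path_report : List (String × List String)) : List (String × List String) :=
  let report := PySem.Dict.ofList error_path_report
  let user_errors := report        -- copy.deepcopy
  let keys := report.keys
  (keys.foldl (fun d k =>
      let pfx := get_path_prefix k
      -- prefix[-1] raises IndexError on an empty prefix: those inputs are outside Pre_
      if PySem.Str.pyGet? pfx (-1) = some '/' then
        let pns := PySem.Str.slice pfx (some 0) (some (PySem.Str.len pfx - 1))
        if d.contains pns then d.erase pns else d
      else d) user_errors).items

-- ===== PORT B =====
-- B's helper: the parent directory a path shadows, or none for a depth-one file path;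
-- path.rindex('/') raises ValueError on slash-free paths: those are outside Pre_
def parent_dir (path : String) : Option String :=
  let i := PySem.Str.rfind path "/"
  if PySem.Str.count path "/" = 1 && !(i == PySem.Str.len path - 1) then none
  else some (PySem.Str.slice path none (some i))

def get_target_errors_alt (error_path_report : List (String × List String)) : List (String × List String) :=
  let report := PySem.Dict.ofList error_path_report
  report.items.filter (fun kv =>
    !(report.keys.any (fun j => parent_dir j == some kv.1)))

-- ===== PRECONDITION & SPEC =====
-- Pre_ excludes exactly the inputs where Python A raises: on a key containing no slash,
-- get_path_prefix returns a zero-length prefix whose last-character lookup raises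
-- IndexError (B's rindex raises on such keys too).
def Pre_get_target_errors (error_path_report : List (String × List String)) : Prop :=
  ∀ kv ∈ error_path_report, PySem.Str.count kv.1 "/" ≠ 0
instance (error_path_report : List (String × List String)) : Decidable (Pre_get_target_errors error_path_report) := by unfold Pre_get_target_errors; infer_instance

def pvWitness_get_target_errors : (List (String × List String)) :=
  [("a/b", ["err1"]), ("a/b/c", ["err2"]), ("x/y", ["err3"])]

def Spec_get_target_errors (error_path_report : List (String × List String)) (out : List (String × List String)) : Prop := out = get_target_errors_alt error_path_report
instance (error_path_report : List (String × List String)) (out : List (String × List String)) : Decidable (Spec_get_target_errors error_path_report out) := by unfold Spec_get_target_errors; infer_instance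

-- ===== CLAIM (what is proved, stated in full; the proofs are below) =====
def Claim_equal_get_target_errors : Prop := ∀ (error_path_report : List (String × List String)), Dom_get_target_errors error_path_report → Pre_get_target_errors error_path_report → Spec_get_target_errors error_path_report (get_target_errors error_path_report)

-- ===== LEMMAS AND PROOFS =====

-- `any` only looks at members
lemma any_congr_mem {α : Type} {l : List α} {p q : α → Bool}
    (h : ∀ a ∈ l, p a = q a) : l.any p = l.any q := by
  induction l with
  | nil => rfl
  | cons a t ih =>
    simp only [List.any_cons, h a (List.mem_cons_self), ih (fun b hb => h b (List.mem_cons_of_mem _ hb))]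

-- s.count(c) for a single-character needle is List.count
lemma count_go_single (c : Char) (l : List Char) (fuel acc : Nat) (h : l.length ≤ fuel) :
    PySem.Chars.count.go [c] fuel l acc = acc + l.count c := by
  induction l generalizing fuel acc with
  | nil => cases fuel <;> simp [PySem.Chars.count.go]
  | cons a t ih =>
    cases fuel with
    | zero => simp at h
    | succ f =>
      simp only [List.length_cons, Nat.add_one_le_add_one_iff] at h
      by_cases hc : c = a
      · subst hc
        simp [PySem.Chars.count.go, List.isPrefixOf, ih _ _ h]
        omega
      · simp [PySem.Chars.count.go, List.isPrefixOf, beq_iff_eq, hc, ih _ _ h, Ne.symm hc]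

lemma count_single (c : Char) (l : List Char) :
    PySem.Chars.count l [c] = l.count c := by
  simp [PySem.Chars.count, count_go_single c l l.length 0 (le_refl _)]

-- a one-character prefix is the head
lemma isPrefixOf_single (c : Char) (t : List Char) :
    [c].isPrefixOf t = true ↔ t.head? = some c := by
  cases t with
  | nil => simp [List.isPrefixOf]
  | cons a t =>
    show (c == a && List.isPrefixOf [] t) = true ↔ _
    rw [List.isPrefixOf]
    simp only [Bool.and_true, beq_iff_eq, List.head?_cons, Option.some.injEq]
    exact eq_comm

-- unfolding equations for rfind.go (fuel recursion)
lemma rfind_go_zero (s : List Char) (c : Char) :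
    PySem.Chars.rfind.go s [c] 0 = if [c].isPrefixOf s then 0 else -1 := by
  rw [PySem.Chars.rfind.go.eq_def]

lemma rfind_go_succ (s : List Char) (c : Char) (j : Nat) :
    PySem.Chars.rfind.go s [c] (j + 1)
      = if [c].isPrefixOf (s.drop (j + 1)) then ((j : Int) + 1) else PySem.Chars.rfind.go s [c] j := by
  rw [PySem.Chars.rfind.go.eq_def]; push_cast; ring_nf

-- an occurrence of the single-character needle at i is s[i] = c
lemma occ_iff (s : List Char) (c : Char) (i : Nat) :
    [c].isPrefixOf (s.drop i) = true ↔ s[i]? = some c := by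
  rw [isPrefixOf_single, List.head?_drop]

-- rfind.go: its result, when nonnegative, is an occurrence ≤ n …
lemma rfindGo_spec (s : List Char) (c : Char) (n : Nat) :
    PySem.Chars.rfind.go s [c] n = -1 ∨
      (0 ≤ PySem.Chars.rfind.go s [c] n ∧ PySem.Chars.rfind.go s [c] n ≤ (n : Int) ∧
        s[(PySem.Chars.rfind.go s [c] n).toNat]? = some c) := by
  induction n with
  | zero =>
    rw [rfind_go_zero]
    by_cases h : [c].isPrefixOf s = true
    · right
      rw [if_pos h]
      refine ⟨by norm_num, by norm_num, ?_⟩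
      exact (occ_iff s c 0).mp (by simpa using h)
    · left; rw [if_neg h]
  | succ j ih =>
    rw [rfind_go_succ]
    by_cases h : [c].isPrefixOf (s.drop (j + 1)) = true
    · right
      rw [if_pos h]
      refine ⟨by positivity, by push_cast; omega, ?_⟩
      have := (occ_iff s c (j + 1)).mp h
      simpa using this
    · rw [if_neg h]
      rcases ih with h1 | ⟨h1, h2, h3⟩
      · exact Or.inl h1
      · exact Or.inr ⟨h1, by omega, h3⟩

-- … and it is at least every occurrence ≤ n
lemma rfindGo_ge (s : List Char) (c : Char) (n : Nat) (i : Nat) (hi : i ≤ n)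
    (hocc : s[i]? = some c) : (i : Int) ≤ PySem.Chars.rfind.go s [c] n := by
  induction n with
  | zero =>
    interval_cases i
    have h : [c].isPrefixOf s = true := by
      have := (occ_iff s c 0).mpr hocc
      simpa using this
    rw [rfind_go_zero, if_pos h]
    norm_num
  | succ j ih =>
    rw [rfind_go_succ]
    by_cases h : [c].isPrefixOf (s.drop (j + 1)) = true
    · rw [if_pos h]
      omega
    · rw [if_neg h]
      rcases Nat.lt_or_ge i (j + 1) with hij | hij
      · exact ih (by omega)
      · exfalso
        have : i = j + 1 := by omega
        subst this
        exact h ((occ_iff s c (j + 1)).mpr hocc)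

-- the Python rfind of a single character that occurs: occurrence + maximality
lemma rfind_occ (s : List Char) (c : Char) (h : c ∈ s) :
    0 ≤ PySem.Chars.rfind s [c] ∧ (PySem.Chars.rfind s [c]).toNat < s.length ∧
      s[(PySem.Chars.rfind s [c]).toNat]? = some c ∧
      ∀ i : Nat, s[i]? = some c → (i : Int) ≤ PySem.Chars.rfind s [c] := by
  obtain ⟨i, hi, hocc⟩ := List.getElem_of_mem h
  have hocc' : s[i]? = some c := by simp [List.getElem?_eq_getElem hi, hocc]
  have hge := rfindGo_ge s c s.length i (le_of_lt hi) hocc'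
  rcases rfindGo_spec s c s.length with hn | ⟨h1, h2, h3⟩
  · rw [PySem.Chars.rfind] at *; omega
  · rw [PySem.Chars.rfind] at *
    refine ⟨h1, ?_, h3, ?_⟩
    · exact (List.getElem?_eq_some_iff.mp h3).1
    · intro i' hi'
      exact rfindGo_ge s c s.length i'
        (le_of_lt (List.getElem?_eq_some_iff.mp hi').1) hi'

-- when the last character is c, rfind points at it
lemma rfind_last (s : List Char) (c : Char) (h : s.getLast? = some c) :
    PySem.Chars.rfind s [c] = (s.length : Int) - 1 := by
  obtain ⟨t, rfl⟩ := List.getLast?_eq_some_iff.mp h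
  have hmem : c ∈ t ++ [c] := by simp
  obtain ⟨h1, h2, h3, h4⟩ := rfind_occ _ c hmem
  have hlen : (t ++ [c]).length = t.length + 1 := by simp
  have hocc : (t ++ [c])[t.length]? = some c := by
    simp
  have := h4 t.length hocc
  omega

lemma dropLast_take_succ {α : Type} (l : List α) (n : Nat) (h : n < l.length) :
    (l.take (n + 1)).dropLast = l.take n := by
  rcases Nat.lt_or_ge (n + 1) l.length with hl | hl
  · simpa using List.dropLast_take hl
  · have : l.take (n + 1) = l := List.take_of_length_le (by omega)
    rw [this, List.dropLast_eq_take]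
    congr 1
    omega

-- the two strip forms agree: s[0:len(s)-1] = s[:-1]
lemma strip_eq (s : String) :
    PySem.Str.slice s (some 0) (some (PySem.Str.len s - 1)) = PySem.Str.slice s none (some (-1)) := by
  simp only [PySem.Str.slice, PySem.Chars.slice_eq_listSlice]
  congr 1
  have hlen : PySem.Str.len s = (s.toList.length : Int) := by simp [PySem.Str.len_eq]
  rw [hlen]
  generalize s.toList = l
  have h1 : PySem.List.clampIdx l.length ((l.length:Int) - 1) = l.length - 1 := by
    rcases l with _ | ⟨a, t⟩ <;> simp [PySem.List.clampIdx]
  have h2 : PySem.List.clampIdx l.length (-1) = l.length - 1 := by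
    rcases l with _ | ⟨a, t⟩ <;> simp [PySem.List.clampIdx]
  simp [PySem.List.slice, h1, h2]

-- the per-key comparison: A's prefix test-and-strip names y exactly when B's parent_dir is y
lemma beq_comm_str (y v : String) : (y == v) = (v == y) := by
  by_cases h : y = v
  · subst h; rfl
  · simp [h, Ne.symm h]

lemma cand_eq (k y : String) (h : PySem.Str.count k "/" ≠ 0) :
    (decide (PySem.Str.pyGet? (get_path_prefix k) (-1) = some '/') &&
      (y == PySem.Str.slice (get_path_prefix k) (some 0) (some (PySem.Str.len (get_path_prefix k) - 1))))
      = (parent_dir k == some y) := by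
  have hslash : ("/" : String).toList = ['/'] := by decide
  have hcnt : PySem.Str.count k "/" = k.toList.count '/' := by
    rw [PySem.Str.count_eq, hslash, count_single]
  have hrf : PySem.Str.rfind k "/" = PySem.Chars.rfind k.toList ['/'] := by
    rw [PySem.Str.rfind_eq, hslash]
  by_cases h1 : k.toList.count '/' = 1
  · have hpfx : get_path_prefix k = k := by
      unfold get_path_prefix
      rw [if_pos (by rw [hcnt]; exact h1)]
    rw [hpfx]
    by_cases h2 : k.toList.getLast? = some '/'
    · -- last char is '/': both sides name k[:-1]
      have hne : k.toList ≠ [] := by intro hh; rw [hh] at h2; simp at h2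
      have hlen : 1 ≤ k.toList.length := by
        cases hk : k.toList with
        | nil => exact absurd hk hne
        | cons a t => simp
      have hA : PySem.Str.pyGet? k (-1) = some '/' := by
        rw [PySem.Str.pyGet?_eq, PySem.Chars.pyGet?_eq_listPyGet?, PySem.List.pyGet?_neg_one]
        exact h2
      have hr : PySem.Str.rfind k "/" = (k.toList.length : Int) - 1 := by
        rw [hrf, rfind_last _ _ h2]
      have hcond : (decide (PySem.Str.count k "/" = 1) && !(PySem.Str.rfind k "/" == PySem.Str.len k - 1)) = false := by
        have hl : PySem.Str.len k = (k.toList.length : Int) := by simp [PySem.Str.len_eq]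
        rw [hr, hl]
        simp
      have hval : PySem.Str.slice k none (some (PySem.Str.rfind k "/"))
          = PySem.Str.slice k (some 0) (some (PySem.Str.len k - 1)) := by
        rw [strip_eq]
        apply String.toList_inj.mp
        rw [hr]
        simp only [PySem.Str.slice, String.toList_ofList, PySem.Chars.slice_eq_listSlice]
        have e1 : PySem.List.slice k.toList none (some ((k.toList.length : Int) - 1))
            = k.toList.take (((k.toList.length : Int) - 1).toNat) :=
          PySem.List.slice_to _ (by omega)
        rw [e1, PySem.List.slice_to_neg_one, List.dropLast_eq_take]
        congr 1
        omega
      simp only [parent_dir]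
      rw [hcond, if_neg (by simp), hval, hA]
      simp only [decide_true, Bool.true_and, Option.some_beq_some]
      exact beq_comm_str _ _
    · -- depth-one path without trailing slash: both sides are false
      have hA : PySem.Str.pyGet? k (-1) ≠ some '/' := by
        rw [PySem.Str.pyGet?_eq, PySem.Chars.pyGet?_eq_listPyGet?, PySem.List.pyGet?_neg_one]
        exact h2
      have hmem : '/' ∈ k.toList := List.count_pos_iff.mp (by omega)
      obtain ⟨hr0, hrlt, hrocc, -⟩ := rfind_occ k.toList '/' hmem
      obtain ⟨r, hgen⟩ : ∃ r, PySem.Chars.rfind k.toList ['/'] = r := ⟨_, rfl⟩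
      rw [hgen] at hr0 hrlt hrocc hrf
      have hner : r ≠ (k.toList.length : Int) - 1 := by
        intro hh
        apply h2
        rw [List.getLast?_eq_getElem?]
        have hrn : r.toNat = k.toList.length - 1 := by omega
        rw [← hrn]
        exact hrocc
      have hcond : (decide (PySem.Str.count k "/" = 1) && !(PySem.Str.rfind k "/" == PySem.Str.len k - 1)) = true := by
        have hl : PySem.Str.len k = (k.toList.length : Int) := by simp [PySem.Str.len_eq]
        rw [hrf, hl, hcnt]
        simp [h1]
        simpa using hner
      simp only [parent_dir]
      rw [hcond, if_pos rfl]
      simp [PySem.List.pyGet?_neg_one, h2]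
  · -- at least two slashes: prefix ends in '/', both sides name k[:rfind]
    have h2 : 2 ≤ k.toList.count '/' := by
      rw [hcnt] at h; omega
    have hmem : '/' ∈ k.toList := List.count_pos_iff.mp (by omega)
    obtain ⟨hr0, hrlt, hrocc, -⟩ := rfind_occ k.toList '/' hmem
    obtain ⟨r, hgen⟩ : ∃ r, PySem.Chars.rfind k.toList ['/'] = r := ⟨_, rfl⟩
    rw [hgen] at hr0 hrlt hrocc hrf
    have hpfx : get_path_prefix k = PySem.Str.slice k (some 0) (some (PySem.Str.rfind k "/" + 1)) := by
      unfold get_path_prefix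
      rw [if_neg (by rw [hcnt]; omega)]
    have htoNat : ((r + 1)).toNat = r.toNat + 1 := by omega
    have hpfxl : (get_path_prefix k).toList = k.toList.take (r.toNat + 1) := by
      rw [hpfx, hrf]
      simp only [PySem.Str.slice, String.toList_ofList, PySem.Chars.slice_eq_listSlice]
      rw [PySem.List.slice_zero_start]
      have e1 : PySem.List.slice k.toList none (some (r + 1)) = k.toList.take ((r + 1).toNat) :=
        PySem.List.slice_to _ (by omega)
      rw [e1, htoNat]
    have hA : PySem.Str.pyGet? (get_path_prefix k) (-1) = some '/' := by
      rw [PySem.Str.pyGet?_eq, PySem.Chars.pyGet?_eq_listPyGet?, PySem.List.pyGet?_neg_one, hpfxl]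
      rw [List.getLast?_eq_getElem?]
      have hlen : (k.toList.take (r.toNat + 1)).length = r.toNat + 1 := by
        rw [List.length_take]; omega
      rw [hlen]
      simp only [Nat.add_sub_cancel, List.getElem?_take]
      rw [if_pos (by omega)]
      exact hrocc
    have hval : PySem.Str.slice k none (some (PySem.Str.rfind k "/"))
        = PySem.Str.slice (get_path_prefix k) (some 0) (some (PySem.Str.len (get_path_prefix k) - 1)) := by
      rw [strip_eq]
      apply String.toList_inj.mp
      rw [PySem.Str.slice_to_neg_one, hpfxl, dropLast_take_succ _ _ hrlt]
      rw [hrf]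
      simp only [PySem.Str.slice, String.toList_ofList, PySem.Chars.slice_eq_listSlice]
      exact PySem.List.slice_to _ hr0
    have hcond : (decide (PySem.Str.count k "/" = 1) && !(PySem.Str.rfind k "/" == PySem.Str.len k - 1)) = false := by
      rw [hcnt]
      simp [h1]
    simp only [parent_dir]
    rw [hcond, if_neg (by simp), hval, hA]
    simp only [decide_true, Bool.true_and, Option.some_beq_some]
    exact beq_comm_str _ _

-- A's deletion loop is a filter of the items by the collected prefixes
lemma foldl_erase_items (ks : List String) (d : PySem.Dict String (List String)) :
    (ks.foldl (fun d k =>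
        let pfx := get_path_prefix k
        if PySem.Str.pyGet? pfx (-1) = some '/' then
          let pns := PySem.Str.slice pfx (some 0) (some (PySem.Str.len pfx - 1))
          if d.contains pns then d.erase pns else d
        else d) d).items
      = d.items.filter (fun kv => !(ks.any (fun k =>
          decide (PySem.Str.pyGet? (get_path_prefix k) (-1) = some '/') &&
          (kv.1 == PySem.Str.slice (get_path_prefix k) (some 0) (some (PySem.Str.len (get_path_prefix k) - 1)))))) := by
  induction ks generalizing d with
  | nil => simp
  | cons k ks ih =>
    simp only [List.foldl_cons]
    rw [ih]
    have hstep : ∀ (d : PySem.Dict String (List String)),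
        ((let pfx := get_path_prefix k
          if PySem.Str.pyGet? pfx (-1) = some '/' then
            let pns := PySem.Str.slice pfx (some 0) (some (PySem.Str.len pfx - 1))
            if d.contains pns then d.erase pns else d
          else d) : PySem.Dict String (List String)).items
        = d.items.filter (fun kv => !(decide (PySem.Str.pyGet? (get_path_prefix k) (-1) = some '/') &&
            (kv.1 == PySem.Str.slice (get_path_prefix k) (some 0) (some (PySem.Str.len (get_path_prefix k) - 1))))) := by
      intro d
      by_cases hc : PySem.Str.pyGet? (get_path_prefix k) (-1) = some '/'
      · simp only [hc, if_true, decide_true, Bool.true_and]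
        by_cases hcon : d.contains (PySem.Str.slice (get_path_prefix k) (some 0) (some (PySem.Str.len (get_path_prefix k) - 1))) = true
        · simp only [hcon, if_true, PySem.Dict.erase]
        · simp only [Bool.not_eq_true] at hcon
          simp only [hcon, Bool.false_eq_true, if_false]
          have : d.items.filter (fun kv => !(kv.1 == PySem.Str.slice (get_path_prefix k) (some 0) (some (PySem.Str.len (get_path_prefix k) - 1)))) = d.items := by
            apply List.filter_eq_self.mpr
            intro p hp
            rw [Bool.not_eq_true']
            by_contra hne
            rw [Bool.not_eq_false] at hne
            have : d.contains (PySem.Str.slice (get_path_prefix k) (some 0) (some (PySem.Str.len (get_path_prefix k) - 1))) = true :=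
              List.any_of_mem hp hne
            rw [this] at hcon; exact absurd hcon (by simp)
          rw [this]
      · simp only [hc, if_false, decide_false, Bool.false_and, Bool.not_false, List.filter_true]
    rw [hstep, List.filter_filter]
    apply List.filter_congr
    intro p _
    simp only [List.any_cons]
    rw [Bool.not_or]
    rw [Bool.and_comm]

-- every key of the materialised dict is a key of the input list
lemma keys_ofList_subset (l : List (String × List String)) (j : String)
    (h : j ∈ (PySem.Dict.ofList l).keys) : j ∈ l.map Prod.fst := by
  have : (PySem.Dict.ofList l).keys = PySem.Set.update (PySem.Dict.empty (κ := String) (ν := List String)).keys (l.map Prod.fst) := by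
    exact PySem.Dict.keys_foldl_insert_key l Prod.fst (fun _ p => p.2) PySem.Dict.empty
  rw [this] at h
  rcases (PySem.Set.mem_update _ _ _).mp h with h | h
  · simp [PySem.Dict.keys_empty] at h
  · exact h

-- ===== VERDICT (by name: the statement is the Claim_ definition above) =====
theorem get_target_errors_spec : Claim_equal_get_target_errors := by
  intro l _ hpre
  unfold Spec_get_target_errors get_target_errors get_target_errors_alt
  simp only []
  rw [foldl_erase_items]
  apply List.filter_congr
  intro kv _
  congr 1
  apply any_congr_mem
  intro j hj
  have hcnt : PySem.Str.count j "/" ≠ 0 := by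
    obtain ⟨kv', hkv', rfl⟩ := List.mem_map.mp (keys_ofList_subset l j hj)
    exact hpre kv' hkv'
  exact cand_eq j kv.1 hcnt
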